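-- pv_equiv track=rewrite | github.com/Jianwei-Lv/Trigger_is_non-central | utils.py | find_triggers
-- ===== SOURCE A (Python) =====
-- def find_triggers(labels,sen_event=None):
--     """
--     :param labels: ['B-Conflict:Attack', 'I-Conflict:Attack', 'O', 'B-Life:Marry']
--     :return: [(0, 2, 'Conflict:Attack'), (3, 4, 'Life:Marry')]
--     """
--     result = []
--     # labels = [label.split('-') for label in labels]
--
--     # for i in range(len(labels)):
--     #     if labels[i][0] == 'B':
--     #         result.append([i, i + 1, labels[i][1]])
--     #
--     # for item in result:
--     #     j = item[1]
--     #     while j < len(labels):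
--     #         if labels[j][0] == 'I':
--     #             j = j + 1
--     #             item[1] = j
--     #         else:
--     #             break
--
--     flag=[]
--     for i in range(len(labels)):
--         if i in flag:
--             continue
--         if labels[i]!='O' :
--             index=i
--             j=i+1
--             while j<len(labels) and labels[j]==labels[i]:
--                 flag.append(j)
--                 j+=1
--             result.append([index, j, labels[i]])
--             # if sen_event ==None:
--             #     result.append([index,j,labels[i]])
--             # else:
--             #     if labels[i] in sen_event:
--             #         result.append([index, j, labels[i]])
--
--     return [tuple(item) for item in result]
-- ===== SOURCE B (Python) =====
-- def find_triggers(labels, sen_event=None):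
--     result = []
--     i = 0
--     n = len(labels)
--     while i < n:
--         lab = labels[i]
--         if lab == 'O':
--             i += 1
--             continue
--         j = i + 1
--         while j < n and labels[j] == lab:
--             j += 1
--         result.append((i, j, lab))
--         i = j
--     return result
-- ===== Notes on version B (the rewrite author's own statement) =====
-- stated objective: faster
-- what changed: Replaced the flag-list bookkeeping (a linear 'i in flag' membership scan per index) with a single pass whose index jumps directly past each consumed run.
import Mathlib
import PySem

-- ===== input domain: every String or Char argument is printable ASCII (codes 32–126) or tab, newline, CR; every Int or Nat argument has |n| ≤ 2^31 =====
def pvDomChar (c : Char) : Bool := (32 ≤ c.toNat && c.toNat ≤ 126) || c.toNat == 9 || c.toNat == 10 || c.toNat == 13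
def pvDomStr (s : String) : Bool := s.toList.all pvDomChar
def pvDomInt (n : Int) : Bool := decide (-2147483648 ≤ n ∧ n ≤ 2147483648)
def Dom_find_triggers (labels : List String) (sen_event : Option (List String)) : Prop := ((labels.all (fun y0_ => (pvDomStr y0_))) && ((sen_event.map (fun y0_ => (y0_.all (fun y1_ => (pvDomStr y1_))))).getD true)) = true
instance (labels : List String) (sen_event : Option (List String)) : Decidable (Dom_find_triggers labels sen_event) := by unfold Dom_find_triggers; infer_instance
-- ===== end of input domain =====

-- B replaces A's flag-list bookkeeping (a membership scan per index) by a single pass whose index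
-- jumps past each consumed run. sen_event is unused by both programs, exactly as in the Python sources.
-- The fuel parameters below (always called with labels.length) only make the while loops total;
-- the fuel never runs out on the actual calls.

-- ===== PORT A =====

-- A's inner while loop: 'while j < len(labels) and labels[j] == labels[i]: flag.append(j); j += 1'
def ftA_run (labels : List String) (lab : String) : Nat → Nat → List Nat → Nat × List Nat
  | 0, j, flag => (j, flag)
  | fuel+1, j, flag =>
    if j < labels.length ∧ labels.getD j "" == lab then
      ftA_run labels lab fuel (j + 1) (flag ++ [j])
    else
      (j, flag)

-- one iteration of A's 'for i in range(len(labels))' body, state = (result, flag)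
def ftA_step (labels : List String) (st : List (Int × Int × String) × List Nat) (i : Nat) :
    List (Int × Int × String) × List Nat :=
  if i ∈ st.2 then st
  else if labels.getD i "" ≠ "O" then
    let r := ftA_run labels (labels.getD i "") labels.length (i + 1) st.2
    (st.1 ++ [((i : Int), (r.1 : Int), labels.getD i "")], r.2)
  else st

def find_triggers (labels : List String) (sen_event : Option (List String)) : List (Int × Int × String) :=
  ((List.range labels.length).foldl (ftA_step labels) ([], [])).1

-- ===== PORT B =====

-- B's inner while loop: advance j past the run of labels equal to lab
def ftB_run (labels : List String) (lab : String) : Nat → Nat → Nat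
  | 0, j => j
  | fuel+1, j =>
    if j < labels.length ∧ labels.getD j "" == lab then
      ftB_run labels lab fuel (j + 1)
    else
      j

-- B's outer while loop: i jumps to the end of each consumed run
def ftB_loop (labels : List String) : Nat → Nat → List (Int × Int × String)
  | 0, _ => []
  | fuel+1, i =>
    if i < labels.length then
      if labels.getD i "" == "O" then
        ftB_loop labels fuel (i + 1)
      else
        let j := ftB_run labels (labels.getD i "") labels.length (i + 1)
        ((i : Int), (j : Int), labels.getD i "") :: ftB_loop labels fuel j
    else
      []

def find_triggers_alt (labels : List String) (sen_event : Option (List String)) : List (Int × Int × String) :=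
  ftB_loop labels labels.length 0

-- ===== PRECONDITION & SPEC =====
def Spec_find_triggers (labels : List String) (sen_event : Option (List String)) (out : List (Int × Int × String)) : Prop := out = find_triggers_alt labels sen_event
instance (labels : List String) (sen_event : Option (List String)) (out : List (Int × Int × String)) : Decidable (Spec_find_triggers labels sen_event out) := by unfold Spec_find_triggers; infer_instance

-- ===== CLAIM (what is proved, stated in full; the proofs are below) =====
def Claim_equal_find_triggers : Prop := ∀ (labels : List String) (sen_event : Option (List String)), Dom_find_triggers labels sen_event → Spec_find_triggers labels sen_event (find_triggers labels sen_event)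

-- ===== LEMMAS AND PROOFS =====

theorem ftB_run_ge (labels : List String) (lab : String) :
    ∀ (fuel j : Nat), j ≤ ftB_run labels lab fuel j := by
  intro fuel
  induction fuel with
  | zero => intro j; simp [ftB_run]
  | succ f ih =>
      intro j
      rw [ftB_run]
      split
      · have := ih (j + 1); omega
      · exact le_rfl

-- A's inner loop produces the same stop index as B's, and appends exactly the skipped indices to flag
theorem ftA_run_eq (labels : List String) (lab : String) :
    ∀ (fuel j : Nat) (flag : List Nat),
      ftA_run labels lab fuel j flag
        = (ftB_run labels lab fuel j, flag ++ List.range' j (ftB_run labels lab fuel j - j)) := by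
  intro fuel
  induction fuel with
  | zero => intro j flag; simp [ftA_run, ftB_run]
  | succ f ih =>
      intro j flag
      rw [ftA_run, ftB_run]
      split
      · rw [ih]
        have hge := ftB_run_ge labels lab f (j + 1)
        have h1 : ftB_run labels lab f (j + 1) - j = (ftB_run labels lab f (j + 1) - (j + 1)) + 1 := by
          omega
        rw [h1, List.range'_succ]
        simp
      · simp

theorem ftB_loop_out (labels : List String) (fuel i : Nat) (h : labels.length ≤ i) :
    ftB_loop labels fuel i = [] := by
  cases fuel with
  | zero => rfl
  | succ f => rw [ftB_loop, if_neg (by omega)]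

-- main invariant: if flag's members ≥ i are exactly the interval [i, e), then A's fold over the
-- remaining indices [i, i+cnt) equals res ++ B's loop from e
theorem ftA_fold_eq (labels : List String) :
    ∀ (cnt i e : Nat) (res : List (Int × Int × String)) (flag : List Nat) (fuel : Nat),
      i + cnt = labels.length → i ≤ e →
      (∀ k ∈ flag, k < e) → (∀ k, i ≤ k → k < e → k ∈ flag) →
      labels.length ≤ e + fuel →
      ((List.range' i cnt).foldl (ftA_step labels) (res, flag)).1 = res ++ ftB_loop labels fuel e := by
  intro cnt
  induction cnt with
  | zero =>
      intro i e res flag fuel hlen hie hub hin hfu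
      rw [ftB_loop_out labels fuel e (by omega)]
      simp
  | succ c ih =>
      intro i e res flag fuel hlen hie hub hin hfu
      have hilt : i < labels.length := by omega
      rw [List.range'_succ, List.foldl_cons]
      by_cases hlt : i < e
      · have hmem : i ∈ flag := hin i le_rfl hlt
        rw [ftA_step, if_pos hmem]
        exact ih (i+1) e res flag fuel (by omega) (by omega) hub
          (fun k h1 h2 => hin k (by omega) h2) hfu
      · have hei : e = i := by omega
        subst hei
        have hmem : e ∉ flag := fun h => by have := hub e h; omega
        obtain ⟨f, rfl⟩ : ∃ f, fuel = f + 1 := ⟨fuel - 1, by omega⟩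
        by_cases hO : labels.getD e "" = "O"
        · rw [ftA_step, if_neg hmem, if_neg (fun hc => hc hO)]
          rw [ftB_loop, if_pos hilt, if_pos (by simp only [beq_iff_eq]; exact hO)]
          exact ih (e+1) (e+1) res flag f (by omega) le_rfl
            (fun k hk => by have := hub k hk; omega) (fun k h1 h2 => by omega) (by omega)
        · rw [ftA_step, if_neg hmem, if_pos hO]
          simp only [ftA_run_eq]
          have hge := ftB_run_ge labels (labels.getD e "") labels.length (e + 1)
          rw [ftB_loop, if_pos hilt, if_neg (by simp only [beq_iff_eq]; exact hO)]
          rw [ih (e+1) (ftB_run labels (labels.getD e "") labels.length (e+1)) _ _ f (by omega) hge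
            (by
              intro k hk
              rcases List.mem_append.1 hk with h | h
              · have := hub k h; omega
              · have := List.mem_range'_1.1 h; omega)
            (by
              intro k h1 h2
              exact List.mem_append.2 (Or.inr (List.mem_range'_1.2 ⟨h1, by omega⟩)))
            (by omega)]
          simp

-- ===== VERDICT (by name: the statement is the Claim_ definition above) =====
theorem find_triggers_spec : Claim_equal_find_triggers := by
  intro labels sen_event _
  unfold Spec_find_triggers find_triggers find_triggers_alt
  rw [List.range_eq_range']
  exact ftA_fold_eq labels labels.length 0 0 [] [] labels.length (by omega) le_rfl
    (by simp) (by omega) (by omega)
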